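-- pv_equiv track=rewrite | github.com/amitsajwan/MCP_API | generic_dependency_mcp_server.py | _matches_entity_pattern
-- ===== SOURCE A (Python) =====
-- def _matches_entity_pattern(operation_id: str, entity_name: str) -> bool:
--     """Check if operation_id matches entity pattern"""
--     patterns = [
--         f"get{entity_name}s",
--         f"get{entity_name}",
--         f"list{entity_name}s",
--         f"list{entity_name}",
--         f"find{entity_name}s",
--         f"find{entity_name}",
--     ]
--
--     for pattern in patterns:
--         if operation_id.lower() == pattern.lower():
--             return True
--     return False
-- ===== SOURCE B (Python) =====
-- def _matches_entity_pattern(operation_id: str, entity_name: str) -> bool: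
--     """Suffix-first parse: peel an optional trailing 's', then require the entity
--     as a suffix and a verb ('get'/'list'/'find') as the remaining prefix."""
--     op = operation_id.lower()
--     ent = entity_name.lower()
--     cores = ([op[:-1]] if op.endswith("s") else []) + [op]
--     for core in cores:
--         if core.endswith(ent) and core[:len(core) - len(ent)] in ("get", "list", "find"):
--             return True
--     return False
-- ===== Notes on version B (the rewrite author's own statement) =====
-- stated objective: alternative
-- what changed: Instead of generating six candidate pattern strings and comparing the id against each, B parses the lowercased id from the end: it peels an optional trailing 's', then requires the entity name as a suffix and checks that the remaining leading slice is one of the verbs 'get'/'list'/'find'.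
import Mathlib
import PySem

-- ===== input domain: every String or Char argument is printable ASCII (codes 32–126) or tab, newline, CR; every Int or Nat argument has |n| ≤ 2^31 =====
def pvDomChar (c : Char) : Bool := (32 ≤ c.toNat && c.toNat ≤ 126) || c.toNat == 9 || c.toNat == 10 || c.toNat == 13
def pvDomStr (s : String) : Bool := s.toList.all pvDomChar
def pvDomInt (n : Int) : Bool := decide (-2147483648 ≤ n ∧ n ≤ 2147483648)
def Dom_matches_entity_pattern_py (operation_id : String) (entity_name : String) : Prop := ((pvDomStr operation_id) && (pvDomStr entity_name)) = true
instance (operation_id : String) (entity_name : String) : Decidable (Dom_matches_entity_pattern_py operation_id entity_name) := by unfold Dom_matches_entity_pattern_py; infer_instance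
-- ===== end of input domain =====

-- B parses the id from the end (peel an optional trailing 's', then entity suffix + verb prefix) instead of enumerating six candidate strings (alternative decomposition, same behaviour).

-- ===== PORT A =====
def matches_entity_pattern_py (operation_id : String) (entity_name : String) : Bool :=
  -- patterns = [f"get{entity_name}s", …]  (concatenation on code points, exact)
  let patterns : List (List Char) :=
    [ "get".toList ++ entity_name.toList ++ "s".toList
    , "get".toList ++ entity_name.toList
    , "list".toList ++ entity_name.toList ++ "s".toList
    , "list".toList ++ entity_name.toList
    , "find".toList ++ entity_name.toList ++ "s".toList
    , "find".toList ++ entity_name.toList ]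
  -- for pattern in patterns: if operation_id.lower() == pattern.lower(): return True / return False
  patterns.any (fun pattern =>
    PySem.Chars.lower operation_id.toList == PySem.Chars.lower pattern)

-- ===== PORT B =====
def matches_entity_pattern_py_alt (operation_id : String) (entity_name : String) : Bool :=
  let op := PySem.Chars.lower operation_id.toList
  let ent := PySem.Chars.lower entity_name.toList
  -- cores = ([op[:-1]] if op.endswith("s") else []) + [op]
  let cores : List (List Char) :=
    (if PySem.Chars.endswith op "s".toList then [PySem.Chars.slice op none (some (-1))] else []) ++ [op]
  -- for core in cores: if core.endswith(ent) and core[:len(core)-len(ent)] in ('get','list','find'): return True / return False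
  cores.any (fun core =>
    PySem.Chars.endswith core ent &&
    (let pre := PySem.Chars.slice core none (some ((core.length : Int) - (ent.length : Int)))
     pre == "get".toList || pre == "list".toList || pre == "find".toList))

-- ===== PRECONDITION & SPEC =====
def Spec_matches_entity_pattern_py (operation_id : String) (entity_name : String) (out : Bool) : Prop := out = matches_entity_pattern_py_alt operation_id entity_name
instance (operation_id : String) (entity_name : String) (out : Bool) : Decidable (Spec_matches_entity_pattern_py operation_id entity_name out) := by unfold Spec_matches_entity_pattern_py; infer_instance

-- ===== CLAIM (what is proved, stated in full; the proofs are below) =====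
def Claim_equal_matches_entity_pattern_py : Prop := ∀ (operation_id : String) (entity_name : String), Dom_matches_entity_pattern_py operation_id entity_name → Spec_matches_entity_pattern_py operation_id entity_name (matches_entity_pattern_py operation_id entity_name)

-- ===== LEMMAS AND PROOFS =====

-- 'core is exactly v followed by ent' ↔ 'ent is a suffix of core and the slice before it is v'
theorem pv_core_iff (core ent v : List Char) :
    (PySem.Chars.endswith core ent = true ∧
      PySem.List.slice core none (some ((core.length : Int) - (ent.length : Int))) = v)
    ↔ core = v ++ ent := by
  rw [PySem.Chars.endswith_iff]
  constructor
  · rintro ⟨⟨t, rfl⟩, h⟩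
    have hℓ : ((t ++ ent).length : Int) - (ent.length : Int) = ((t.length : Nat) : Int) := by
      simp
    rw [hℓ, PySem.List.slice_to_natCast] at h
    simp at h; subst h; rfl
  · rintro rfl
    refine ⟨⟨v, rfl⟩, ?_⟩
    have hℓ : ((v ++ ent).length : Int) - (ent.length : Int) = ((v.length : Nat) : Int) := by
      simp
    rw [hℓ, PySem.List.slice_to_natCast]
    simp

-- given op ends with 's', 'op = w ++ "s"' ↔ 'dropping the last char gives w'
theorem pv_drop_s (op w : List Char) (h : PySem.Chars.endswith op "s".toList = true) :
    op = w ++ "s".toList ↔ op.dropLast = w := by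
  rw [PySem.Chars.endswith_iff] at h
  obtain ⟨t, rfl⟩ := h
  constructor
  · intro e
    have := List.append_cancel_right e.symm
    rw [← this]; simp
  · intro hw; rw [← hw]; simp

set_option maxHeartbeats 4000000 in
theorem matches_entity_pattern_py_eq (operation_id entity_name : String) :
    matches_entity_pattern_py operation_id entity_name
      = matches_entity_pattern_py_alt operation_id entity_name := by
  unfold matches_entity_pattern_py matches_entity_pattern_py_alt
  have hlow : ∀ (a b : List Char), PySem.Chars.lower (a ++ b)
      = PySem.Chars.lower a ++ PySem.Chars.lower b := by
    intro a b; simp [PySem.Chars.lower]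
  have hget : PySem.Chars.lower "get".toList = "get".toList := by decide
  have hlist : PySem.Chars.lower "list".toList = "list".toList := by decide
  have hfind : PySem.Chars.lower "find".toList = "find".toList := by decide
  have hs : PySem.Chars.lower "s".toList = "s".toList := by decide
  simp only [List.any_cons, List.any_nil, Bool.or_false, hlow, hget, hlist, hfind, hs,
    PySem.Chars.slice_eq_listSlice]
  generalize PySem.Chars.lower operation_id.toList = op
  generalize PySem.Chars.lower entity_name.toList = ent
  -- characterise the per-core test of B
  have hC : ∀ core : List Char,
      (PySem.Chars.endswith core ent &&
        ((PySem.List.slice core none (some ((core.length : Int) - (ent.length : Int))) == "get".toList) ||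
         (PySem.List.slice core none (some ((core.length : Int) - (ent.length : Int))) == "list".toList) ||
         (PySem.List.slice core none (some ((core.length : Int) - (ent.length : Int))) == "find".toList))) = true
      ↔ (core = "get".toList ++ ent ∨ core = "list".toList ++ ent ∨ core = "find".toList ++ ent) := by
    intro core
    simp only [Bool.and_eq_true, Bool.or_eq_true, beq_iff_eq]
    rw [← pv_core_iff core ent "get".toList, ← pv_core_iff core ent "list".toList,
        ← pv_core_iff core ent "find".toList]
    tauto
  rw [Bool.eq_iff_iff]
  by_cases h : PySem.Chars.endswith op "s".toList = true
  · simp only [h, if_true, List.singleton_append, List.any_cons, List.any_nil, Bool.or_false,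
      PySem.List.slice_to_neg_one, Bool.or_eq_true]
    rw [hC op.dropLast, hC op]
    simp only [beq_iff_eq]
    have hg : op = "get".toList ++ (ent ++ "s".toList) ↔ op.dropLast = "get".toList ++ ent := by
      rw [← List.append_assoc]; exact pv_drop_s op _ h
    have hl : op = "list".toList ++ (ent ++ "s".toList) ↔ op.dropLast = "list".toList ++ ent := by
      rw [← List.append_assoc]; exact pv_drop_s op _ h
    have hf : op = "find".toList ++ (ent ++ "s".toList) ↔ op.dropLast = "find".toList ++ ent := by
      rw [← List.append_assoc]; exact pv_drop_s op _ h
    rw [List.append_assoc, List.append_assoc, List.append_assoc]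
    tauto
  · simp only [Bool.not_eq_true] at h
    simp only [h, Bool.false_eq_true, if_false, List.nil_append, List.any_cons, List.any_nil,
      Bool.or_false, Bool.or_eq_true]
    rw [hC op]
    simp only [beq_iff_eq]
    have hns : ∀ w : List Char, ¬ op = w ++ "s".toList := by
      intro w e
      have : PySem.Chars.endswith op "s".toList = true := by
        rw [PySem.Chars.endswith_iff, e]; exact ⟨w, rfl⟩
      rw [h] at this; exact Bool.false_ne_true this
    have hg : ¬ op = "get".toList ++ (ent ++ "s".toList) := by
      rw [← List.append_assoc]; exact hns _
    have hl : ¬ op = "list".toList ++ (ent ++ "s".toList) := by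
      rw [← List.append_assoc]; exact hns _
    have hf : ¬ op = "find".toList ++ (ent ++ "s".toList) := by
      rw [← List.append_assoc]; exact hns _
    rw [List.append_assoc, List.append_assoc, List.append_assoc]
    tauto

-- ===== VERDICT (by name: the statement is the Claim_ definition above) =====
theorem matches_entity_pattern_py_spec : Claim_equal_matches_entity_pattern_py := by
  intro operation_id entity_name _
  unfold Spec_matches_entity_pattern_py
  exact matches_entity_pattern_py_eq operation_id entity_name
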